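-- pv_equiv track=rewrite | github.com/hltdi/arbevol | src/arbevol/utils.py | same_order
-- ===== SOURCE A (Python) =====
-- def same_order(s1, s2):
--     '''Are the elements in two lists in the same order?'''
--     curr_pos = 0
--     for e1 in s1:
--         if e1 in s2:
--             next_pos = s2.index(e1)
--             if next_pos >= curr_pos:
--                 curr_pos = next_pos
--             else:
--                 return False
--     return True
-- ===== SOURCE B (Python) =====
-- def same_order(s1, s2):
--     '''Are the elements in two lists in the same order?'''
--     # Greedy single sweep over s2: at each FIRST occurrence of a value,
--     # consume the matching leading elements of the pending (filtered) s1.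
--     # s1's order is fine iff everything pending gets consumed.
--     s2set = set(s2)
--     rest = [e for e in s1 if e in s2set]
--     seen = set()
--     for x in s2:
--         if x not in seen:
--             seen.add(x)
--             while rest and rest[0] == x:
--                 rest = rest[1:]
--     return not rest
-- ===== Notes on version B (the rewrite author's own statement) =====
-- stated objective: faster
-- what changed: Replaces A's scan over s1 (curr_pos accumulator with an s2.index inner scan per element) by a single greedy sweep over s2 with a seen-set: at each first occurrence of a value it consumes the matching leading pending s1-elements, and s1 is in order iff everything pending gets consumed; no indices are ever computed or compared.
import Mathlib
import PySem

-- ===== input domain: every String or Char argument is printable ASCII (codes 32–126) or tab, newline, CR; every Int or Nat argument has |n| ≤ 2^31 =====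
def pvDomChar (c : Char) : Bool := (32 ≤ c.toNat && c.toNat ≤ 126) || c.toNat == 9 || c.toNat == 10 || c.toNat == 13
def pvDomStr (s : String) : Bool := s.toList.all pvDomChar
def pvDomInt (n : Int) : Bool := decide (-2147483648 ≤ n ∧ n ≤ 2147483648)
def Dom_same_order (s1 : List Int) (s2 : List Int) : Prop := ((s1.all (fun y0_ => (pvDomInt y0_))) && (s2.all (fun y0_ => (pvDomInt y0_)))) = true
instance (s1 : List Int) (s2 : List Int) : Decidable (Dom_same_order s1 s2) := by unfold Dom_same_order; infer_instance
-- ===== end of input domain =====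

-- B replaces A's index-chain scan over s1 (curr_pos accumulator with s2.index inner scans)
-- by a single greedy sweep over s2: at each first occurrence of a value it consumes the
-- matching leading pending s1-elements; s1 is in order iff everything pending is consumed.

-- ===== PORT A =====
-- A's loop: 'if e1 in s2: next_pos = s2.index(e1)' is ported as one match on
-- PySem.List.index? (some ↔ membership, the index is the same s2.index value).
def sameOrderLoop (s2 : List Int) (curr : Nat) : List Int → Bool
  | [] => true
  | e1 :: rest =>
    match PySem.List.index? s2 e1 with
    | none => sameOrderLoop s2 curr rest
    | some next_pos =>
      if next_pos ≥ curr then sameOrderLoop s2 next_pos rest else false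

def same_order (s1 : List Int) (s2 : List Int) : Bool :=
  sameOrderLoop s2 0 s1

-- ===== PORT B =====
-- 'while rest and rest[0] == x: rest = rest[1:]'
def pvConsume (x : Int) : List Int → List Int
  | [] => []
  | y :: ys => if y = x then pvConsume x ys else y :: ys

-- one iteration of B's 'for x in s2' loop over the state (seen, rest)
def pvStep (st : PySem.Set Int × List Int) (x : Int) : PySem.Set Int × List Int :=
  if PySem.Set.contains st.1 x then st else (PySem.Set.add st.1 x, pvConsume x st.2)

def same_order_alt (s1 : List Int) (s2 : List Int) : Bool :=
  let s2set : PySem.Set Int := PySem.Set.ofList s2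
  let rest := s1.filter (fun e => PySem.Set.contains s2set e)
  (s2.foldl pvStep (PySem.Set.empty, rest)).2.isEmpty

-- ===== PRECONDITION & SPEC =====
def Spec_same_order (s1 : List Int) (s2 : List Int) (out : Bool) : Prop := out = same_order_alt s1 s2
instance (s1 : List Int) (s2 : List Int) (out : Bool) : Decidable (Spec_same_order s1 s2 out) := by unfold Spec_same_order; infer_instance

-- ===== CLAIM (what is proved, stated in full; the proofs are below) =====
def Claim_equal_same_order : Prop := ∀ (s1 : List Int) (s2 : List Int), Dom_same_order s1 s2 → Spec_same_order s1 s2 (same_order s1 s2)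

-- ===== LEMMAS AND PROOFS =====

-- first-occurrence index of e in l (meaningful only when e ∈ l)
def pvIdx (l : List Int) (e : Int) : Nat := (PySem.List.index? l e).getD 0

-- A's accumulator chain, recursively
def pvChk : Nat → List Nat → Bool
  | _, [] => true
  | c, x :: xs => (decide (c ≤ x)) && pvChk x xs

-- adjacent-pairs non-decreasing
def pvAdj : List Nat → Bool
  | [] => true
  | [_] => true
  | a :: b :: r => (decide (a ≤ b)) && pvAdj (b :: r)

-- the values of s2 not yet seen, first occurrences in order
def pvDD (S : PySem.Set Int) : List Int → List Int
  | [] => []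
  | x :: xs => if PySem.Set.contains S x then pvDD S xs else x :: pvDD (PySem.Set.add S x) xs

-- B's sweep with the seen-set already discharged
def pvGRun : List Int → List Int → List Int
  | [], r => r
  | x :: xs, r => pvGRun xs (pvConsume x r)

theorem pvIdx_cons_ne (x v : Int) (xs : List Int) (h : x ≠ v) (hm : v ∈ xs) :
    pvIdx (x :: xs) v = pvIdx xs v + 1 := by
  obtain ⟨k, hk⟩ := Option.isSome_iff_exists.mp ((PySem.List.index?_isSome_iff xs v).mpr hm)
  unfold pvIdx
  rw [PySem.List.index?_cons_of_ne xs h, hk]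
  rfl

theorem pvIdx_cons_self (x : Int) (xs : List Int) : pvIdx (x :: xs) x = 0 := by
  unfold pvIdx
  rw [PySem.List.index?_cons_self]
  rfl

theorem loop_eq_chk (s2 : List Int) : ∀ (s1 : List Int) (c : Nat),
    sameOrderLoop s2 c s1 = pvChk c (s1.filterMap (fun e => PySem.List.index? s2 e)) := by
  intro s1
  induction s1 with
  | nil => intro c; rfl
  | cons e rest ih =>
    intro c
    simp only [sameOrderLoop, List.filterMap_cons]
    cases h : PySem.List.index? s2 e with
    | none => exact ih c
    | some i =>
      simp only [pvChk, ge_iff_le]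
      by_cases hc : c ≤ i
      · simp [hc, ih i]
      · simp [hc]

theorem filterMap_eq_map_idx (s2 : List Int) : ∀ (s1 : List Int),
    s1.filterMap (fun e => PySem.List.index? s2 e)
      = (s1.filter (fun e => decide (e ∈ s2))).map (pvIdx s2) := by
  intro s1
  induction s1 with
  | nil => rfl
  | cons e rest ih =>
    simp only [List.filterMap_cons, List.filter_cons]
    cases h : PySem.List.index? s2 e with
    | none =>
      have hne : e ∉ s2 := (PySem.List.index?_eq_none_iff s2 e).mp h
      rw [if_neg (by simpa using hne)]
      exact ih
    | some k =>
      have hme : e ∈ s2 := (PySem.List.index?_isSome_iff s2 e).mp (by rw [h]; rfl)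
      have hidx : pvIdx s2 e = k := by unfold pvIdx; rw [h]; rfl
      rw [if_pos (by simpa using hme), List.map_cons, hidx, ← ih]

theorem chk_eq_adj_cons : ∀ (l : List Nat) (c : Nat), pvChk c l = pvAdj (c :: l) := by
  intro l
  induction l with
  | nil => intro c; rfl
  | cons x xs ih => intro c; simp only [pvChk, pvAdj, ih x]

theorem adj_zero_cons (l : List Nat) : pvAdj (0 :: l) = pvAdj l := by
  cases l with
  | nil => rfl
  | cons x xs => simp [pvAdj]

theorem adj_map_congr (f g : Int → Nat) : ∀ (t : List Int),
    (∀ a ∈ t, ∀ b ∈ t, (f a ≤ f b ↔ g a ≤ g b)) → pvAdj (t.map f) = pvAdj (t.map g) := by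
  intro t
  induction t with
  | nil => intro _; rfl
  | cons a t ih =>
    intro h
    cases t with
    | nil => rfl
    | cons b r =>
      have hab : f a ≤ f b ↔ g a ≤ g b := h a (by simp) b (by simp)
      have hr : pvAdj ((b :: r).map f) = pvAdj ((b :: r).map g) :=
        ih (fun x hx y hy => h x (by simp [hx]) y (by simp [hy]))
      simp only [List.map_cons] at hr ⊢
      simp only [pvAdj, hr]
      congr 1
      exact decide_eq_decide.mpr hab

theorem foldl_eq_gRun : ∀ (s2 : List Int) (S : PySem.Set Int) (r : List Int),
    (s2.foldl pvStep (S, r)).2 = pvGRun (pvDD S s2) r := by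
  intro s2
  induction s2 with
  | nil => intro S r; rfl
  | cons x xs ih =>
    intro S r
    simp only [List.foldl_cons, pvStep, pvDD]
    by_cases h : PySem.Set.contains S x
    · simp only [h, if_true]
      exact ih S r
    · simp only [h, if_false, Bool.false_eq_true, pvGRun]
      exact ih (PySem.Set.add S x) (pvConsume x r)

theorem mem_pvDD (e : Int) : ∀ (s2 : List Int) (S : PySem.Set Int),
    e ∈ pvDD S s2 ↔ e ∈ s2 ∧ e ∉ S := by
  intro s2
  induction s2 with
  | nil => intro S; simp [pvDD]
  | cons x xs ih =>
    intro S
    simp only [pvDD]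
    by_cases h : PySem.Set.contains S x
    · have hxS : x ∈ S := (PySem.Set.contains_iff S x).mp h
      rw [if_pos h, ih]
      constructor
      · rintro ⟨h1, h2⟩; exact ⟨List.mem_cons_of_mem x h1, h2⟩
      · rintro ⟨h1, h2⟩
        rcases List.mem_cons.mp h1 with rfl | h1
        · exact absurd hxS h2
        · exact ⟨h1, h2⟩
    · have hxS : x ∉ S := fun hm => h ((PySem.Set.contains_iff S x).mpr hm)
      simp only [if_neg h, List.mem_cons, ih, PySem.Set.mem_add _ _ _]
      constructor
      · rintro (rfl | ⟨h1, h2⟩)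
        · exact ⟨Or.inl rfl, hxS⟩
        · exact ⟨Or.inr h1, fun hS => h2 (Or.inl hS)⟩
      · rintro ⟨(rfl | h1), h2⟩
        · exact Or.inl rfl
        · by_cases hx : e = x
          · exact Or.inl hx
          · exact Or.inr ⟨h1, fun hS => hS.elim h2 hx⟩

theorem nodup_pvDD : ∀ (s2 : List Int) (S : PySem.Set Int), (pvDD S s2).Nodup := by
  intro s2
  induction s2 with
  | nil => intro S; simp [pvDD]
  | cons x xs ih =>
    intro S
    simp only [pvDD]
    by_cases h : PySem.Set.contains S x
    · simp only [if_pos h]; exact ih S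
    · simp only [if_neg h]
      refine List.nodup_cons.mpr ⟨?_, ih (PySem.Set.add S x)⟩
      intro hmem
      have := ((mem_pvDD x xs (PySem.Set.add S x)).mp hmem).2
      exact this ((PySem.Set.mem_add _ _ _).mpr (Or.inr rfl))

theorem idx_pvDD_mono (a b : Int) : ∀ (s2 : List Int) (S : PySem.Set Int),
    a ∈ s2 → b ∈ s2 → a ∉ S → b ∉ S →
    (pvIdx (pvDD S s2) a ≤ pvIdx (pvDD S s2) b ↔ pvIdx s2 a ≤ pvIdx s2 b) := by
  intro s2
  induction s2 with
  | nil => intro S ha; exact absurd ha (List.not_mem_nil)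
  | cons x xs ih =>
    intro S ha hb haS hbS
    simp only [pvDD]
    by_cases h : PySem.Set.contains S x
    · -- x already seen: a ≠ x, b ≠ x, so both indices in x::xs are successors
      have hxS : x ∈ S := (PySem.Set.contains_iff S x).mp h
      have hax : x ≠ a := fun he => haS (he ▸ hxS)
      have hbx : x ≠ b := fun he => hbS (he ▸ hxS)
      have ha' : a ∈ xs := by
        rcases List.mem_cons.mp ha with rfl | h' ; exact absurd hxS haS; exact h'
      have hb' : b ∈ xs := by
        rcases List.mem_cons.mp hb with rfl | h' ; exact absurd hxS hbS; exact h'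
      rw [if_pos h, pvIdx_cons_ne x a xs hax ha', pvIdx_cons_ne x b xs hbx hb',
        Nat.add_le_add_iff_right]
      exact ih S ha' hb' haS hbS
    · rw [if_neg h]
      by_cases hax : a = x
      · subst hax
        simp [pvIdx_cons_self]
      · have ha' : a ∈ xs := by
          rcases List.mem_cons.mp ha with rfl | h' ; exact absurd rfl hax; exact h'
        have haDD : a ∈ pvDD (PySem.Set.add S x) xs := by
          rw [mem_pvDD]
          exact ⟨ha', fun hm => ((PySem.Set.mem_add _ _ _).mp hm).elim haS hax⟩
        by_cases hbx : b = x
        · subst hbx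
          rw [pvIdx_cons_self, pvIdx_cons_self, pvIdx_cons_ne b a _ (Ne.symm hax) haDD,
            pvIdx_cons_ne b a xs (Ne.symm hax) ha']
          simp
        · have hb' : b ∈ xs := by
            rcases List.mem_cons.mp hb with rfl | h' ; exact absurd rfl hbx; exact h'
          have hbDD : b ∈ pvDD (PySem.Set.add S x) xs := by
            rw [mem_pvDD]
            exact ⟨hb', fun hm => ((PySem.Set.mem_add _ _ _).mp hm).elim hbS hbx⟩
          rw [pvIdx_cons_ne x a _ (fun he => hax he.symm) haDD,
            pvIdx_cons_ne x b _ (fun he => hbx he.symm) hbDD,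
            pvIdx_cons_ne x a xs (fun he => hax he.symm) ha',
            pvIdx_cons_ne x b xs (fun he => hbx he.symm) hb',
            Nat.add_le_add_iff_right, Nat.add_le_add_iff_right]
          exact ih (PySem.Set.add S x) ha' hb'
            (fun hm => ((PySem.Set.mem_add _ _ _).mp hm).elim haS hax)
            (fun hm => ((PySem.Set.mem_add _ _ _).mp hm).elim hbS hbx)

theorem mem_pvConsume (e x : Int) : ∀ (t : List Int), e ∈ t → e ≠ x → e ∈ pvConsume x t := by
  intro t
  induction t with
  | nil => intro h; exact absurd h (List.not_mem_nil)
  | cons y ys ih =>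
    intro hm hne
    simp only [pvConsume]
    by_cases hy : y = x
    · rw [if_pos hy]
      rcases List.mem_cons.mp hm with rfl | hm'
      · exact absurd hy hne
      · exact ih hm' hne
    · rw [if_neg hy]; exact hm

theorem mem_gRun (e : Int) : ∀ (d t : List Int), e ∈ t → e ∉ d → e ∈ pvGRun d t := by
  intro d
  induction d with
  | nil => intro t h _; exact h
  | cons x xs ih =>
    intro t hm hnd
    have hne : e ≠ x := fun he => hnd (he ▸ List.mem_cons_self)
    simp only [pvGRun]
    exact ih _ (mem_pvConsume e x t hm hne) (fun h => hnd (List.mem_cons_of_mem x h))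

theorem adj_le (a : Nat) : ∀ (l : List Nat), pvAdj (a :: l) = true → ∀ b ∈ l, a ≤ b := by
  intro l
  induction l generalizing a with
  | nil => intro _ b hb; exact absurd hb (List.not_mem_nil)
  | cons x xs ih =>
    intro h b hb
    simp only [pvAdj, Bool.and_eq_true, decide_eq_true_eq] at h
    rcases List.mem_cons.mp hb with rfl | hb'
    · exact h.1
    · exact le_trans h.1 (ih x h.2 b hb')

theorem gRun_eq_adj : ∀ (d : List Int), d.Nodup → ∀ (t : List Int), (∀ e ∈ t, e ∈ d) →
    (pvGRun d t).isEmpty = pvAdj (t.map (pvIdx d)) := by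
  intro d
  induction d with
  | nil =>
    intro _ t ht
    cases t with
    | nil => rfl
    | cons e es => exact absurd (ht e List.mem_cons_self) (List.not_mem_nil)
  | cons x xs ih =>
    intro hnd t ht
    have hxxs : x ∉ xs := (List.nodup_cons.mp hnd).1
    have hxs : xs.Nodup := (List.nodup_cons.mp hnd).2
    induction t with
    | nil =>
      have : ∀ (l : List Int), pvGRun l [] = [] := by
        intro l; induction l with
        | nil => rfl
        | cons a as ihl => simpa [pvGRun, pvConsume] using ihl
      simp [this, pvAdj]
    | cons y t' iht =>
      by_cases hyx : y = x
      · -- leading element equals x: both sides drop it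
        subst hyx
        have h1 : pvGRun (y :: xs) (y :: t') = pvGRun (y :: xs) t' := by
          simp [pvGRun, pvConsume]
        have h2 : pvAdj ((y :: t').map (pvIdx (y :: xs))) = pvAdj (t'.map (pvIdx (y :: xs))) := by
          simp only [List.map_cons, pvIdx_cons_self]
          exact adj_zero_cons _
        rw [h1, h2]
        exact iht (fun e he => ht e (List.mem_cons_of_mem y he))
      · -- head differs from x
        have hrun : pvGRun (x :: xs) (y :: t') = pvGRun xs (y :: t') := by
          simp [pvGRun, pvConsume, Ne.symm, hyx]
        by_cases hxt : x ∈ t'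
        · -- x occurs later in t: both sides are false
          have hl : (pvGRun xs (y :: t')).isEmpty = false := by
            have : x ∈ pvGRun xs (y :: t') :=
              mem_gRun x xs (y :: t') (List.mem_cons_of_mem y hxt) hxxs
            cases hgr : pvGRun xs (y :: t') with
            | nil => rw [hgr] at this; exact absurd this (List.not_mem_nil)
            | cons a as => rfl
          have hy : y ∈ xs := by
            rcases List.mem_cons.mp (ht y List.mem_cons_self) with rfl | h'
            · exact absurd rfl hyx
            · exact h'
          have hr : pvAdj ((y :: t').map (pvIdx (x :: xs))) = false := by
            by_contra hcon
            have htrue : pvAdj (pvIdx (x :: xs) y :: t'.map (pvIdx (x :: xs))) = true := by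
              rw [List.map_cons] at hcon
              cases hval : pvAdj (pvIdx (x :: xs) y :: t'.map (pvIdx (x :: xs))) with
              | false => exact absurd hval hcon
              | true => rfl
            have hle := adj_le _ _ htrue (pvIdx (x :: xs) x)
              (List.mem_map.mpr ⟨x, hxt, rfl⟩)
            rw [pvIdx_cons_self, pvIdx_cons_ne x y xs (fun h => hyx h.symm) hy] at hle
            omega
          rw [hrun, hl, hr]
        · -- x does not occur in t at all: use the IH on xs
          have htxs : ∀ e ∈ (y :: t'), e ∈ xs := by
            intro e he
            rcases List.mem_cons.mp (ht e he) with rfl | h'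
            · exact absurd he (by
                intro hm
                rcases List.mem_cons.mp hm with h1 | h1
                · exact hyx h1.symm
                · exact hxt h1)
            · exact h'
          rw [hrun, ih hxs (y :: t') htxs]
          refine (adj_map_congr (pvIdx (x :: xs)) (pvIdx xs) (y :: t') ?_).symm
          intro a haM b hbM
          have ha : a ∈ xs := htxs a haM
          have hb : b ∈ xs := htxs b hbM
          have hax : x ≠ a := fun he => hxxs (he ▸ ha)
          have hbx : x ≠ b := fun he => hxxs (he ▸ hb)
          rw [pvIdx_cons_ne x a xs hax ha, pvIdx_cons_ne x b xs hbx hb]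
          omega

-- ===== VERDICT (by name: the statement is the Claim_ definition above) =====
theorem same_order_spec : Claim_equal_same_order := by
  intro s1 s2 _
  unfold Spec_same_order same_order same_order_alt
  rw [loop_eq_chk, filterMap_eq_map_idx, chk_eq_adj_cons, adj_zero_cons]
  have hfilter : (s1.filter (fun e => PySem.Set.contains (PySem.Set.ofList s2) e))
      = s1.filter (fun e => decide (e ∈ s2)) := by
    apply List.filter_congr
    intro e _
    by_cases h : e ∈ s2
    · rw [(PySem.Set.contains_iff _ _).mpr ((PySem.Set.mem_ofList _ _).mpr h)]
      simp [h]
    · have hcf : PySem.Set.contains (PySem.Set.ofList s2) e = false := by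
        cases hc : PySem.Set.contains (PySem.Set.ofList s2) e with
        | false => rfl
        | true => exact absurd ((PySem.Set.mem_ofList _ _).mp ((PySem.Set.contains_iff _ _).mp hc)) h
      rw [hcf]
      simp [h]
  simp only [hfilter]
  set t := s1.filter (fun e => decide (e ∈ s2)) with ht
  have htmem : ∀ e ∈ t, e ∈ s2 := by
    intro e he
    have := List.of_mem_filter he
    simpa using this
  rw [foldl_eq_gRun s2 PySem.Set.empty t]
  have hdmem : ∀ e ∈ t, e ∈ pvDD PySem.Set.empty s2 := by
    intro e he
    rw [mem_pvDD]
    exact ⟨htmem e he, by simp [PySem.Set.empty]⟩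
  rw [gRun_eq_adj (pvDD PySem.Set.empty s2) (nodup_pvDD s2 PySem.Set.empty) t hdmem]
  refine (adj_map_congr (pvIdx s2) (pvIdx (pvDD PySem.Set.empty s2)) t ?_)
  intro a haM b hbM
  exact (idx_pvDD_mono a b s2 PySem.Set.empty (htmem a haM) (htmem b hbM)
    (by simp [PySem.Set.empty]) (by simp [PySem.Set.empty])).symm
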